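-- pv_equiv track=rewrite | github.com/Tsygankov-Slava/Confidence_bounds_for_threshold_similarity_graph_in_random_variable_network | main.py | generate_groups_for_K1i
-- ===== SOURCE A (Python) =====
-- def generate_groups_for_K1i(K1i):
--     K1i_values = list(K1i.values())
--     groups = {}
--
--     for key, value in K1i.items():
--         key = key.split()[0]
--         if value in groups:
--             groups[value].append(key)
--         else:
--             if K1i_values.count(value) > 1:
--                 groups[value] = [key]
--     return groups
-- ===== SOURCE B (Python) =====
-- def generate_groups_for_K1i(K1i):
--     pairs = [(k.split()[0], v) for k, v in K1i.items()]
--     seen, dup = set(), set()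
--     for _, v in pairs:
--         if v in seen:
--             dup.add(v)
--         seen.add(v)
--     order = []
--     for _, v in pairs:
--         if v in dup and v not in order:
--             order.append(v)
--     return {v: [k for k, val in pairs if val == v] for v in order}
-- ===== Notes on version B (the rewrite author's own statement) =====
-- stated objective: alternative
-- what changed: B inverts the traversal: instead of A's single item-major pass mutating a dict with a membership/count branch per item, B first computes the set of duplicated values with a seen/dup set pass, lists those values in first-occurrence order, and then builds each group value-major with a comprehension scanning the items per duplicated value.
import Mathlib
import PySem

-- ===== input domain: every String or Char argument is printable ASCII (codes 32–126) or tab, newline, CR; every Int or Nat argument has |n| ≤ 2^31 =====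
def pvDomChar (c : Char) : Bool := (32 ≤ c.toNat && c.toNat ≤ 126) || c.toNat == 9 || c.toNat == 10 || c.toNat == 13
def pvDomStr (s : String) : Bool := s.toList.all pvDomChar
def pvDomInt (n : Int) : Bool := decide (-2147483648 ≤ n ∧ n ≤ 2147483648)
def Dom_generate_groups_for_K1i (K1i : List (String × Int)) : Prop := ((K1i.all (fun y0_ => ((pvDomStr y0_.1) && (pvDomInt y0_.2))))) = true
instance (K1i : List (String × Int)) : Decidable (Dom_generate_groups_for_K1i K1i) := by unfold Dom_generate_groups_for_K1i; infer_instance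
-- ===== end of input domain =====

-- B inverts the traversal: a seen/dup set pass finds duplicated values, then groups are
-- built value-major by comprehension, instead of A's item-major dict mutation with a
-- membership/count branch per item (alternative decomposition, similar cost).


-- first word of a key; the default for the out-of-range case is unreachable under Pre_
def pvFirstWord (k : String) : String := (PySem.List.pyGet? (PySem.Str.split₀ k) 0).getD ""

-- ===== PORT A =====
def generate_groups_for_K1i (K1i : List (String × Int)) : List (Int × List String) :=
  let K1i_values := K1i.map (·.2)
  let groups : PySem.Dict Int (List String) :=
    K1i.foldl (fun groups kv =>
      let key := pvFirstWord kv.1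
      let value := kv.2
      if groups.contains value then
        groups.modify value [] (· ++ [key])
      else
        if 1 < K1i_values.count value then groups.insert value [key] else groups)
      PySem.Dict.empty
  groups.items

-- ===== PORT B =====
def generate_groups_for_K1i_alt (K1i : List (String × Int)) : List (Int × List String) :=
  let pairs := K1i.map (fun kv => (pvFirstWord kv.1, kv.2))
  let sd := pairs.foldl (fun (sd : PySem.Set Int × PySem.Set Int) p =>
      (PySem.Set.add sd.1 p.2, if sd.1.contains p.2 then PySem.Set.add sd.2 p.2 else sd.2))
      (PySem.Set.empty, PySem.Set.empty)
  let dup := sd.2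
  let order := pairs.foldl (fun (ord : List Int) p =>
      if dup.contains p.2 && !(ord.contains p.2) then ord ++ [p.2] else ord) []
  order.map (fun v => (v, (pairs.filter (fun q => q.2 == v)).map (·.1)))

-- ===== PRECONDITION & SPEC =====
-- Pre_ excludes inputs containing a whitespace-only key: there taking the first word of the
-- split key raises IndexError in A, and in B alike.
def Pre_generate_groups_for_K1i (K1i : List (String × Int)) : Prop :=
  ∀ p ∈ K1i, PySem.Str.split₀ p.1 ≠ []
instance (K1i : List (String × Int)) : Decidable (Pre_generate_groups_for_K1i K1i) := by unfold Pre_generate_groups_for_K1i; infer_instance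

def pvWitness_generate_groups_for_K1i : (List (String × Int)) := [("a x", 1), ("b", 1), ("c", 2)]

def Spec_generate_groups_for_K1i (K1i : List (String × Int)) (out : List (Int × List String)) : Prop := out = generate_groups_for_K1i_alt K1i
instance (K1i : List (String × Int)) (out : List (Int × List String)) : Decidable (Spec_generate_groups_for_K1i K1i out) := by unfold Spec_generate_groups_for_K1i; infer_instance

-- ===== CLAIM (what is proved, stated in full; the proofs are below) =====
def Claim_equal_generate_groups_for_K1i : Prop := ∀ (K1i : List (String × Int)), Dom_generate_groups_for_K1i K1i → Pre_generate_groups_for_K1i K1i → Spec_generate_groups_for_K1i K1i (generate_groups_for_K1i K1i)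

-- ===== LEMMAS AND PROOFS =====

-- helper abbreviations used only by the proofs
def pvStepB (g : PySem.Dict Int (List String)) (kv : String × Int) : PySem.Dict Int (List String) :=
  g.modify kv.2 [] (· ++ [pvFirstWord kv.1])

def pvStepA (P : Int → Bool) (g : PySem.Dict Int (List String)) (kv : String × Int) : PySem.Dict Int (List String) :=
  if g.contains kv.2 then g.modify kv.2 [] (· ++ [pvFirstWord kv.1])
  else if P kv.2 then g.insert kv.2 [pvFirstWord kv.1] else g

def pvF (P : Int → Bool) (g : PySem.Dict Int (List String)) : PySem.Dict Int (List String) :=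
  PySem.Dict.mk (g.items.filter (fun p => P p.1))

def pvLookup (l : List (Int × List String)) (v : Int) : List String :=
  ((l.find? (fun p => p.1 == v)).map (·.2)).getD []

def pvSD (vs : List Int) : PySem.Set Int × PySem.Set Int :=
  vs.foldl (fun sd v =>
      (PySem.Set.add sd.1 v, if sd.1.contains v then PySem.Set.add sd.2 v else sd.2))
    (PySem.Set.empty, PySem.Set.empty)

theorem pv_any_filter {α : Type} (l : List (Int × α)) (P : Int → Bool) (v : Int) :
    ((l.filter (fun p => P p.1)).any (fun p => p.1 == v)) = (P v && l.any (fun p => p.1 == v)) := by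
  rw [Bool.eq_iff_iff]
  simp only [List.any_eq_true, List.mem_filter, Bool.and_eq_true, beq_iff_eq]
  constructor
  · rintro ⟨p, ⟨hp, hPp⟩, hv'⟩
    exact ⟨hv' ▸ hPp, p, hp, hv'⟩
  · rintro ⟨hPv, p, hp, hv'⟩
    exact ⟨p, ⟨hp, hv' ▸ hPv⟩, hv'⟩

theorem pv_find?_of_not_any {α : Type} (l : List (Int × α)) (v : Int)
    (h : l.any (fun p => p.1 == v) = false) : l.find? (fun p => p.1 == v) = none := by
  simp only [List.find?_eq_none]
  intro x hx
  simp only [List.any_eq_false] at h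
  exact h x hx

theorem pv_find?_filter {α : Type} (l : List (Int × α)) (P : Int → Bool) (v : Int) (hv : P v = true) :
    ((l.filter (fun p => P p.1)).find? (fun p => p.1 == v)) = l.find? (fun p => p.1 == v) := by
  rw [List.find?_filter]
  have h : (fun (a : Int × α) => decide ((fun p => P p.1) a = true ∧ (fun (p : Int × α) => p.1 == v) a = true))
      = (fun (p : Int × α) => p.1 == v) := by
    funext a
    by_cases h : a.1 = v
    · simp [h, hv]
    · simp [h]
  rw [h]

theorem pv_filter_map_upd {α : Type} (l : List (Int × α)) (P : Int → Bool) (v : Int) (w : α) (hv : P v = true) :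
    ((l.map (fun p => if p.1 == v then (v, w) else p)).filter (fun p => P p.1)) =
      (l.filter (fun p => P p.1)).map (fun p => if p.1 == v then (v, w) else p) := by
  rw [List.filter_map]
  have h : ∀ x ∈ l, ((fun (p : Int × α) => P p.1) ∘ (fun p => if p.1 == v then (v, w) else p)) x
      = (fun (p : Int × α) => P p.1) x := by
    intro x _
    by_cases hx : x.1 = v
    · simp [hx, hv]
    · simp [hx]
  rw [List.filter_congr h]

theorem pv_filter_map_upd_false {α : Type} (l : List (Int × α)) (P : Int → Bool) (v : Int) (w : α) (hv : P v = false) :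
    ((l.map (fun p => if p.1 == v then (v, w) else p)).filter (fun p => P p.1)) =
      l.filter (fun p => P p.1) := by
  rw [List.filter_map]
  have h : ∀ x ∈ l, ((fun (p : Int × α) => P p.1) ∘ (fun p => if p.1 == v then (v, w) else p)) x
      = (fun (p : Int × α) => P p.1) x := by
    intro x _
    by_cases hx : x.1 = v
    · simp [hx, hv]
    · simp [hx]
  rw [List.filter_congr h]
  have h2 : ∀ x ∈ l.filter (fun (p : Int × α) => P p.1),
      (fun (p : Int × α) => if p.1 == v then (v, w) else p) x = id x := by
    intro x hx
    have hPx : P x.1 = true := (List.mem_filter.mp hx).2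
    have hne : x.1 ≠ v := by
      intro h'
      rw [h', hv] at hPx
      exact Bool.false_ne_true hPx
    simp [hne]
  rw [List.map_congr_left h2, List.map_id]

theorem pv_stepB_items (l : List (Int × List String)) (k : String) (v : Int) :
    (pvStepB (PySem.Dict.mk l) (k, v)).items =
      if l.any (fun p => p.1 == v)
      then l.map (fun p => if p.1 == v then (v, pvLookup l v ++ [pvFirstWord k]) else p)
      else l ++ [(v, [pvFirstWord k])] := by
  have hmod : pvStepB (PySem.Dict.mk l) (k, v)
      = (PySem.Dict.mk l).insert v ((PySem.Dict.mk l).getD v [] ++ [pvFirstWord k]) := rfl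
  by_cases hb : (l.any (fun p => p.1 == v)) = true
  · have hc : (PySem.Dict.mk l).contains v = true := hb
    rw [hmod, PySem.Dict.items_insert_of_contains _ _ hc, if_pos hb]
    rfl
  · have hbf : (l.any (fun p => p.1 == v)) = false := Bool.eq_false_iff.mpr hb
    have hc : (PySem.Dict.mk l).contains v = false := hbf
    have hg : (PySem.Dict.mk l).getD v [] = [] := by
      show ((l.find? (fun p => p.1 == v)).map (·.2)).getD [] = []
      rw [pv_find?_of_not_any l v hbf]
      rfl
    rw [hmod, hg, PySem.Dict.items_insert_of_not_contains _ _ hc, if_neg hb]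
    simp

theorem pv_step_comm (P : Int → Bool) (g : PySem.Dict Int (List String)) (kv : String × Int) :
    pvStepA P (pvF P g) kv = pvF P (pvStepB g kv) := by
  obtain ⟨l⟩ := g
  obtain ⟨k, v⟩ := kv
  have hcF : (pvF P (PySem.Dict.mk l)).contains v = (P v && l.any (fun p => p.1 == v)) :=
    pv_any_filter l P v
  have hB : (pvF P (pvStepB (PySem.Dict.mk l) (k, v))).items
      = ((pvStepB (PySem.Dict.mk l) (k, v)).items).filter (fun p => P p.1) := rfl
  apply PySem.Dict.ext
  rw [hB, pv_stepB_items]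
  by_cases hb : (l.any (fun p => p.1 == v)) = true
  · rw [if_pos hb]
    by_cases hP : P v = true
    · have hc : (pvF P (PySem.Dict.mk l)).contains v = true := by rw [hcF, hP, hb]; rfl
      have hgd : (pvF P (PySem.Dict.mk l)).getD v [] = pvLookup l v := by
        show (((l.filter (fun p => P p.1)).find? (fun p => p.1 == v)).map (·.2)).getD [] = _
        rw [pv_find?_filter l P v hP]
        rfl
      have hstep : pvStepA P (pvF P (PySem.Dict.mk l)) (k, v)
          = (pvF P (PySem.Dict.mk l)).insert v ((pvF P (PySem.Dict.mk l)).getD v [] ++ [pvFirstWord k]) := by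
        show (if (pvF P (PySem.Dict.mk l)).contains v then _ else _) = _
        rw [if_pos hc]
        rfl
      rw [hstep, hgd, PySem.Dict.items_insert_of_contains _ _ hc]
      show List.map _ (List.filter _ l) = _
      rw [pv_filter_map_upd l P v _ hP]
    · have hPf : P v = false := Bool.eq_false_iff.mpr hP
      have hc : (pvF P (PySem.Dict.mk l)).contains v = false := by rw [hcF, hPf]; rfl
      have hstep : pvStepA P (pvF P (PySem.Dict.mk l)) (k, v) = pvF P (PySem.Dict.mk l) := by
        show (if (pvF P (PySem.Dict.mk l)).contains v then _ else _) = _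
        rw [if_neg (by simp [hc]), if_neg (by simp [hPf])]
      rw [hstep, pv_filter_map_upd_false l P v _ hPf]
      rfl
  · have hbf : (l.any (fun p => p.1 == v)) = false := Bool.eq_false_iff.mpr hb
    rw [if_neg hb, List.filter_append]
    have hc : (pvF P (PySem.Dict.mk l)).contains v = false := by rw [hcF, hbf, Bool.and_false]
    by_cases hP : P v = true
    · have hstep : pvStepA P (pvF P (PySem.Dict.mk l)) (k, v)
          = (pvF P (PySem.Dict.mk l)).insert v [pvFirstWord k] := by
        show (if (pvF P (PySem.Dict.mk l)).contains v then _ else _) = _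
        rw [if_neg (by simp [hc]), if_pos hP]
      rw [hstep, PySem.Dict.items_insert_of_not_contains _ _ hc]
      show (List.filter _ l) ++ _ = (List.filter _ l) ++ _
      rw [List.filter_cons, if_pos (show P (v, [pvFirstWord k]).1 = true from hP)]
      rfl
    · have hPf : P v = false := Bool.eq_false_iff.mpr hP
      have hstep : pvStepA P (pvF P (PySem.Dict.mk l)) (k, v) = pvF P (PySem.Dict.mk l) := by
        show (if (pvF P (PySem.Dict.mk l)).contains v then _ else _) = _
        rw [if_neg (by simp [hc]), if_neg (by simp [hPf])]
      rw [hstep, List.filter_cons, if_neg (by simp [hPf])]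
      show List.filter (fun p => P p.1) l = _
      simp

theorem pv_fold_comm (P : Int → Bool) (L : List (String × Int)) (g : PySem.Dict Int (List String)) :
    L.foldl (pvStepA P) (pvF P g) = pvF P (L.foldl pvStepB g) := by
  induction L generalizing g with
  | nil => rfl
  | cons kv rest ih => simp only [List.foldl_cons, pv_step_comm]; exact ih _

-- the grouped dict's items, value-major: one entry per distinct value, in first-occurrence
-- order, carrying all first-words of keys with that value in item order
theorem pv_grouped_items (K1i : List (String × Int)) :
    (K1i.foldl pvStepB PySem.Dict.empty).items
      = (PySem.Set.ofList (K1i.map (·.2))).map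
          (fun v => (v, (K1i.filter (fun kv => kv.2 == v)).map (fun kv => pvFirstWord kv.1))) := by
  have hfold : K1i.foldl pvStepB PySem.Dict.empty =
      (K1i.map (fun kv => (kv.2, pvFirstWord kv.1))).foldl
        (fun d q => d.modify q.1 [] (· ++ [q.2])) PySem.Dict.empty := by
    rw [List.foldl_map]; rfl
  have hnd : (K1i.foldl pvStepB PySem.Dict.empty).keys.Nodup := by
    rw [hfold]
    exact PySem.Dict.nodup_keys_foldl_modify_key _ _ _ _ _ (by simp [PySem.Dict.keys, PySem.Dict.empty])
  have hkeys : (K1i.foldl pvStepB PySem.Dict.empty).keys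
      = PySem.Set.ofList (K1i.map (·.2)) := by
    rw [hfold, PySem.Dict.keys_foldl_modify_key]
    show PySem.Set.update (PySem.Dict.empty : PySem.Dict Int (List String)).keys
        ((K1i.map (fun kv => (kv.2, pvFirstWord kv.1))).map (fun q => q.1)) = _
    have h1 : (K1i.map (fun kv => (kv.2, pvFirstWord kv.1))).map (fun q => q.1) = K1i.map (·.2) := by
      simp [Function.comp]
    rw [h1]
    rfl
  rw [PySem.Dict.items_eq_map_keys _ hnd [], hkeys]
  apply List.map_congr_left
  intro v _
  have hg : (K1i.foldl pvStepB PySem.Dict.empty).getD v []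
      = (K1i.filter (fun kv => kv.2 == v)).map (fun kv => pvFirstWord kv.1) := by
    rw [hfold, PySem.Dict.getD_foldl_modify_append]
    have he : (PySem.Dict.empty : PySem.Dict Int (List String)).getD v [] = [] := rfl
    rw [he]
    rw [List.filter_map, List.map_map]
    rfl
  rw [hg]

theorem pv_filter_map_fst (K1i : List (String × Int)) (D : List Int) :
    (D.map (fun v => (v, (K1i.filter (fun kv => kv.2 == v)).map (fun kv => pvFirstWord kv.1)))).filter
      (fun p => decide (1 < (K1i.map (·.2)).count p.1))
    = (D.filter (fun v => decide (1 < (K1i.map (·.2)).count v))).map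
      (fun v => (v, (K1i.filter (fun kv => kv.2 == v)).map (fun kv => pvFirstWord kv.1))) := by
  rw [List.filter_map]
  rfl

-- seen/dup pass: seen collects the values, dup exactly the duplicated ones
theorem pv_sd_spec (vs : List Int) :
    ∀ v : Int, (v ∈ (pvSD vs).1 ↔ v ∈ vs) ∧ (v ∈ (pvSD vs).2 ↔ 1 < vs.count v) := by
  induction vs using List.reverseRecOn with
  | nil => intro v; simp [pvSD, PySem.Set.empty]
  | append_singleton xs x ih =>
    intro v
    have hstep : pvSD (xs ++ [x])
        = (PySem.Set.add (pvSD xs).1 x,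
           if (pvSD xs).1.contains x then PySem.Set.add (pvSD xs).2 x else (pvSD xs).2) := by
      simp [pvSD, List.foldl_append]
    have hcont : (pvSD xs).1.contains x = decide (x ∈ xs) := by
      rw [Bool.eq_iff_iff]
      simp [(ih x).1]
    have hcnt : (xs ++ [x]).count v = xs.count v + (if v = x then 1 else 0) := by
      by_cases hv : v = x
      · simp [List.count_append, hv]
      · have hv' : ¬ x = v := fun h => hv h.symm
        simp [List.count_append, hv, hv']
    rw [hstep]
    refine ⟨?_, ?_⟩
    · simp only [PySem.Set.mem_add, (ih v).1, List.mem_append, List.mem_singleton]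
    · rw [hcnt]
      by_cases hxs : x ∈ xs
      · rw [if_pos (by rw [hcont]; exact decide_eq_true hxs)]
        simp only [PySem.Set.mem_add, (ih v).2]
        by_cases hv : v = x
        · subst hv
          have h1 : 0 < xs.count v := List.count_pos_iff.mpr hxs
          have h2 : (if v = v then 1 else 0) = 1 := by simp
          rw [h2]
          constructor
          · intro _; omega
          · intro _; right; rfl
        · simp only [if_neg hv]
          constructor
          · rintro (h | h)
            · omega
            · exact absurd h hv
          · intro h; left; omega
      · rw [if_neg (by rw [hcont]; simp [hxs])]
        simp only [(ih v).2]
        by_cases hv : v = x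
        · subst hv
          have h0 : xs.count v = 0 := List.count_eq_zero.mpr hxs
          simp [h0]
        · simp only [if_neg hv]
          omega

-- the order pass: duplicated values in first-occurrence order
theorem pv_order_spec (dup : PySem.Set Int) (vs : List Int) :
    vs.foldl (fun ord v => if dup.contains v && !(ord.contains v) then ord ++ [v] else ord) []
      = (PySem.Set.ofList vs).filter (fun v => dup.contains v) := by
  induction vs using List.reverseRecOn with
  | nil => rfl
  | append_singleton xs x ih =>
    rw [List.foldl_append, List.foldl_cons, List.foldl_nil, ih]
    have hof : PySem.Set.ofList (xs ++ [x]) = PySem.Set.add (PySem.Set.ofList xs) x := by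
      simp [PySem.Set.ofList_eq_foldl, List.foldl_append]
    rw [hof]
    by_cases hd : dup.contains x = true
    · have hd' : x ∈ dup := by simpa using hd
      by_cases hx : x ∈ PySem.Set.ofList xs
      · have hx' : x ∈ xs := (PySem.Set.mem_ofList xs x).mp hx
        have hadd : PySem.Set.add (PySem.Set.ofList xs) x = PySem.Set.ofList xs := by
          simp [PySem.Set.add, hx]
        simp [hd', hx']
      · have hx' : x ∉ xs := fun h => hx ((PySem.Set.mem_ofList xs x).mpr h)
        have hadd : PySem.Set.add (PySem.Set.ofList xs) x = PySem.Set.ofList xs ++ [x] := by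
          simp [PySem.Set.add, hx]
        simp [hd', hx', List.filter_append]
    · have hd' : x ∉ dup := by
        intro h
        exact hd (by simpa using h)
      by_cases hx : x ∈ PySem.Set.ofList xs
      · have hadd : PySem.Set.add (PySem.Set.ofList xs) x = PySem.Set.ofList xs := by
          simp [PySem.Set.add, hx]
        simp [hd', hadd]
      · have hadd : PySem.Set.add (PySem.Set.ofList xs) x = PySem.Set.ofList xs ++ [x] := by
          simp [PySem.Set.add, hx]
        simp [hd', hadd, List.filter_append]

set_option maxHeartbeats 2000000 in
theorem pv_A_items (K1i : List (String × Int)) :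
    generate_groups_for_K1i K1i
      = ((K1i.foldl pvStepB PySem.Dict.empty).items).filter
          (fun p => decide (1 < (K1i.map (·.2)).count p.1)) := by
  have h0 : generate_groups_for_K1i K1i
      = (K1i.foldl (fun groups kv =>
          if groups.contains kv.2 then groups.modify kv.2 [] (· ++ [pvFirstWord kv.1])
          else if 1 < (K1i.map (·.2)).count kv.2 then groups.insert kv.2 [pvFirstWord kv.1]
          else groups) PySem.Dict.empty).items := rfl
  have hbody : (fun (groups : PySem.Dict Int (List String)) (kv : String × Int) =>
      if groups.contains kv.2 then groups.modify kv.2 [] (· ++ [pvFirstWord kv.1])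
      else if 1 < (K1i.map (·.2)).count kv.2 then groups.insert kv.2 [pvFirstWord kv.1]
      else groups)
      = pvStepA (fun v => decide (1 < (K1i.map (·.2)).count v)) := by
    funext g kv
    by_cases hc : g.contains kv.2 = true
    · simp [pvStepA, hc]
    · by_cases hcount : 1 < (K1i.map (·.2)).count kv.2 <;> simp [pvStepA, hc, hcount]
  have hemp : pvF (fun v => decide (1 < (K1i.map (·.2)).count v)) PySem.Dict.empty
      = PySem.Dict.empty := rfl
  have hfold : K1i.foldl (pvStepA (fun v => decide (1 < (K1i.map (·.2)).count v)))
        (pvF (fun v => decide (1 < (K1i.map (·.2)).count v)) PySem.Dict.empty)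
      = pvF (fun v => decide (1 < (K1i.map (·.2)).count v)) (K1i.foldl pvStepB PySem.Dict.empty) :=
    pv_fold_comm (fun v => decide (1 < (K1i.map (·.2)).count v)) K1i PySem.Dict.empty
  have hfilt : (pvF (fun v => decide (1 < (K1i.map (·.2)).count v))
        (K1i.foldl pvStepB PySem.Dict.empty)).items
      = ((K1i.foldl pvStepB PySem.Dict.empty).items).filter
          (fun p => decide (1 < (K1i.map (·.2)).count p.1)) := rfl
  rw [hemp] at hfold
  rw [h0, hbody, hfold, hfilt]

set_option maxHeartbeats 2000000 in
theorem pv_A_eq (K1i : List (String × Int)) :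
    generate_groups_for_K1i K1i
      = ((PySem.Set.ofList (K1i.map (·.2))).filter
            (fun v => decide (1 < (K1i.map (·.2)).count v))).map
          (fun v => (v, (K1i.filter (fun kv => kv.2 == v)).map (fun kv => pvFirstWord kv.1))) := by
  rw [pv_A_items, pv_grouped_items]
  exact pv_filter_map_fst K1i (PySem.Set.ofList (K1i.map (·.2)))

set_option maxHeartbeats 1000000 in
theorem pv_B_eq (K1i : List (String × Int)) :
    generate_groups_for_K1i_alt K1i
      = ((PySem.Set.ofList (K1i.map (·.2))).filter
            (fun v => decide (1 < (K1i.map (·.2)).count v))).map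
          (fun v => (v, (K1i.filter (fun kv => kv.2 == v)).map (fun kv => pvFirstWord kv.1))) := by
  have hswap : (K1i.map (fun kv => (pvFirstWord kv.1, kv.2))).foldl
      (fun (sd : PySem.Set Int × PySem.Set Int) p =>
        (PySem.Set.add sd.1 p.2, if sd.1.contains p.2 then PySem.Set.add sd.2 p.2 else sd.2))
      (PySem.Set.empty, PySem.Set.empty) = pvSD (K1i.map (·.2)) := by
    rw [List.foldl_map]
    show K1i.foldl _ _ = (K1i.map (·.2)).foldl _ _
    rw [List.foldl_map]
  have h0 : generate_groups_for_K1i_alt K1i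
      = ((K1i.map (fun kv => (pvFirstWord kv.1, kv.2))).foldl (fun (ord : List Int) p =>
            if (pvSD (K1i.map (·.2))).2.contains p.2 && !(ord.contains p.2)
            then ord ++ [p.2] else ord) []).map
          (fun v => (v, ((K1i.map (fun kv => (pvFirstWord kv.1, kv.2))).filter
              (fun q => q.2 == v)).map (·.1))) := by
    rw [generate_groups_for_K1i_alt, ← hswap]
  have horder : (K1i.map (fun kv => (pvFirstWord kv.1, kv.2))).foldl (fun (ord : List Int) p =>
        if (pvSD (K1i.map (·.2))).2.contains p.2 && !(ord.contains p.2)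
        then ord ++ [p.2] else ord) []
      = (K1i.map (·.2)).foldl (fun (ord : List Int) v =>
        if (pvSD (K1i.map (·.2))).2.contains v && !(ord.contains v)
        then ord ++ [v] else ord) [] := by
    rw [List.foldl_map]
    show K1i.foldl _ _ = (K1i.map (·.2)).foldl _ _
    rw [List.foldl_map]
  have hdup : ∀ v ∈ PySem.Set.ofList (K1i.map (·.2)),
      (pvSD (K1i.map (·.2))).2.contains v = decide (1 < (K1i.map (·.2)).count v) := by
    intro v _
    rw [Bool.eq_iff_iff]
    simp [(pv_sd_spec (K1i.map (·.2)) v).2]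
  have hgroups : ∀ v : Int,
      ((K1i.map (fun kv => (pvFirstWord kv.1, kv.2))).filter (fun q => q.2 == v)).map (·.1)
        = (K1i.filter (fun kv => kv.2 == v)).map (fun kv => pvFirstWord kv.1) := by
    intro v
    rw [List.filter_map, List.map_map]
    rfl
  rw [h0, horder, pv_order_spec, List.filter_congr hdup]
  apply List.map_congr_left
  intro v _
  rw [hgroups v]

-- ===== VERDICT (by name: the statement is the Claim_ definition above) =====
theorem generate_groups_for_K1i_spec : Claim_equal_generate_groups_for_K1i := by
  intro K1i _ _
  unfold Spec_generate_groups_for_K1i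
  rw [pv_A_eq, pv_B_eq]
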